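-- pv_equiv track=rewrite | github.com/patrickcbrady/patbrady_xaxis_sprintly | aoc2021/day3/day3.py | count_bits_per_pos
-- ===== SOURCE A (Python) =====
-- from typing import List, Dict
--
-- def count_bits_per_pos(report: List[str]) -> Dict[int, Dict[str, int]]:
--     pos_to_val_to_count = {}
--     for num in report:
--         for i, c in enumerate(num):
--             if i not in pos_to_val_to_count:
--                 pos_to_val_to_count[i] = {}
--             if c not in pos_to_val_to_count[i]:
--                 pos_to_val_to_count[i][c] = 0
--             pos_to_val_to_count[i][c] += 1
--     return pos_to_val_to_count
-- ===== SOURCE B (Python) =====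
-- from typing import List, Dict
--
-- def count_bits_per_pos(report: List[str]) -> Dict[int, Dict[str, int]]:
--     # Column-major: find the longest string, then count each column independently.
--     max_len = 0
--     for num in report:
--         if len(num) > max_len:
--             max_len = len(num)
--     result = {}
--     for i in range(max_len):
--         col = [num[i] for num in report if i < len(num)]
--         counts = {}
--         for c in col:
--             counts[c] = counts.get(c, 0) + 1
--         result[i] = counts
--     return result
-- ===== Notes on version B (the rewrite author's own statement) =====
-- stated objective: alternative
-- what changed: Replaced the row-major scan that mutates a growing nested dict per character with a column-major decomposition: compute the maximum length, then for each position build the column of characters and count it into a fresh dict.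
import Mathlib
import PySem

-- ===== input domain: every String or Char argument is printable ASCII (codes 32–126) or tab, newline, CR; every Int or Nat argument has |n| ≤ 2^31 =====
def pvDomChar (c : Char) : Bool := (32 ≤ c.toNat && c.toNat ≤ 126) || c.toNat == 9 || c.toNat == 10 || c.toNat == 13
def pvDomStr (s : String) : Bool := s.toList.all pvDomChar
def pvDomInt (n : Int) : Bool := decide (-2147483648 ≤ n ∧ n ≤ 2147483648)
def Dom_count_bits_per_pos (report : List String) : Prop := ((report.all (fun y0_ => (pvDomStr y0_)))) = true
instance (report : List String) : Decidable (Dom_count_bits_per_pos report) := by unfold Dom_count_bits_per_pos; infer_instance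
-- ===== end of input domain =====

-- B replaces A's row-major scan with a column-major pass (max length, then count each column); alternative decomposition, not claimed faster.

-- ===== PORT A =====
-- row-major: for each string, for each (i, c), ensure keys exist, then increment
def count_bits_per_pos (report : List String) : List (Int × List (String × Int)) :=
  let d : PySem.Dict Int (PySem.Dict String Int) :=
    report.foldl (fun d num =>
      (PySem.List.enumerate num.toList).foldl (fun d ic =>
        let d := if d.contains ic.1 then d else d.insert ic.1 PySem.Dict.empty
        let inner := d.getD ic.1 PySem.Dict.empty
        let inner := if inner.contains (String.ofList [ic.2]) then inner
                     else inner.insert (String.ofList [ic.2]) 0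
        d.insert ic.1 (inner.insert (String.ofList [ic.2])
          (inner.getD (String.ofList [ic.2]) 0 + 1))) d)
      PySem.Dict.empty
  d.items.map (fun p => (p.1, p.2.items))

-- ===== PORT B =====
-- column-major: max length first, then per position build the column and count it into a fresh dict
def count_bits_per_pos_alt (report : List String) : List (Int × List (String × Int)) :=
  let maxLen : Int := report.foldl (fun m num => if PySem.Str.len num > m then PySem.Str.len num else m) 0
  let result : PySem.Dict Int (PySem.Dict String Int) :=
    (PySem.List.pyRange 0 maxLen).foldl (fun r i =>
      let col : List String := report.filterMap (fun num =>
        if i < PySem.Str.len num then (PySem.Str.pyGet? num i).map (fun c => String.ofList [c]) else none)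
      let counts : PySem.Dict String Int :=
        col.foldl (fun cd c => cd.insert c (cd.getD c 0 + 1)) PySem.Dict.empty
      r.insert i counts)
      PySem.Dict.empty
  result.items.map (fun p => (p.1, p.2.items))

-- ===== PRECONDITION & SPEC =====
def Spec_count_bits_per_pos (report : List String) (out : List (Int × List (String × Int))) : Prop := out = count_bits_per_pos_alt report
instance (report : List String) (out : List (Int × List (String × Int))) : Decidable (Spec_count_bits_per_pos report out) := by unfold Spec_count_bits_per_pos; infer_instance

-- ===== CLAIM (what is proved, stated in full; the proofs are below) =====
def Claim_equal_count_bits_per_pos : Prop := ∀ (report : List String), Dom_count_bits_per_pos report → Spec_count_bits_per_pos report (count_bits_per_pos report)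

-- ===== LEMMAS AND PROOFS =====
def pvColumn (report : List String) (i : Nat) : List String :=
  report.filterMap (fun s => (s.toList[i]?).map (fun c => String.ofList [c]))
def pvMaxLen (report : List String) : Nat :=
  report.foldl (fun m s => max m s.toList.length) 0

theorem pvColumn_append (rs : List String) (s : String) (i : Nat) :
    pvColumn (rs ++ [s]) i
      = pvColumn rs i ++ ((s.toList[i]?).map (fun c => String.ofList [c])).toList := by
  cases h : s.toList[i]? <;> simp [pvColumn, List.filterMap_append, h]

theorem pvFoldMax_mono (rs : List String) (a b : Nat) (h : a ≤ b) :
    rs.foldl (fun m s => max m s.toList.length) a ≤ rs.foldl (fun m s => max m s.toList.length) b := by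
  induction rs generalizing a b with
  | nil => simpa
  | cons x xs ih => exact ih _ _ (show max a x.toList.length ≤ max b x.toList.length by omega)

theorem pvLe_foldMax (rs : List String) (a : Nat) :
    a ≤ rs.foldl (fun m s => max m s.toList.length) a := by
  induction rs generalizing a with
  | nil => simp
  | cons x xs ih => exact le_trans (le_max_left _ _) (ih _)

theorem pvLen_le_maxLen (rs : List String) (s : String) (hs : s ∈ rs) :
    s.toList.length ≤ pvMaxLen rs := by
  induction rs with
  | nil => cases hs
  | cons x xs ih =>
    rcases List.mem_cons.mp hs with h | h
    · subst h
      exact le_trans (le_max_right 0 s.toList.length) (pvLe_foldMax xs _)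
    · exact le_trans (ih h) (pvFoldMax_mono xs 0 _ (Nat.zero_le _))

theorem pvColumn_nil_of_ge (rs : List String) (k : Nat) (hk : pvMaxLen rs ≤ k) :
    pvColumn rs k = [] := by
  simp only [pvColumn, List.filterMap_eq_nil_iff]
  intro s hs
  have := pvLen_le_maxLen rs s hs
  simp [List.getElem?_eq_none (by omega : s.toList.length ≤ k)]

theorem pvMaxLen_append (rs : List String) (s : String) :
    pvMaxLen (rs ++ [s]) = max (pvMaxLen rs) s.toList.length := by
  simp [pvMaxLen, List.foldl_append]

def pvCanon (report : List String) : PySem.Dict Int (PySem.Dict String Int) :=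
  PySem.Dict.mk ((List.range (pvMaxLen report)).map
    (fun i : Nat => ((i : Int), PySem.Dict.counter (pvColumn report i))))

theorem pvKeysCanon (rs : List String) : (pvCanon rs).keys = (List.range (pvMaxLen rs)).map (fun i : Nat => (i : Int)) := by
  simp [pvCanon, PySem.Dict.keys_mk]

theorem pvNodupKeysCanon (rs : List String) : (pvCanon rs).keys.Nodup := by
  rw [pvKeysCanon]
  exact (List.nodup_range).map (fun a b => by omega)

theorem pvContainsCanon (rs : List String) (k : Nat) :
    (pvCanon rs).contains (k : Int) = decide (k < pvMaxLen rs) := by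
  rw [PySem.Dict.contains_eq_decide_mem_keys, pvKeysCanon]
  simp [List.mem_map]

theorem pvCanon_append_nil (rs : List String) :
    pvCanon (rs ++ [String.ofList []]) = pvCanon rs := by
  have h1 : pvMaxLen (rs ++ [String.ofList []]) = pvMaxLen rs := by
    rw [pvMaxLen_append]; simp
  apply PySem.Dict.ext
  simp only [pvCanon, h1]
  refine List.map_congr_left fun i _ => ?_
  rw [pvColumn_append]; simp

theorem pvIncr' {κ : Type} [BEq κ] [LawfulBEq κ] (d : PySem.Dict κ Int) (x : κ) :
    (if d.contains x then d else d.insert x 0).insert x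
      ((if d.contains x then d else d.insert x 0).getD x 0 + 1) = d.modify x 0 (· + 1) := by
  by_cases h : d.contains x
  · simp [h, PySem.Dict.modify]
  · simp only [h, Bool.false_eq_true, if_false]
    rw [PySem.Dict.getD_insert_self, PySem.Dict.insert_insert_self, PySem.Dict.modify,
      PySem.Dict.getD_of_not_contains _ _ (by simpa using h)]

theorem pvGetDCanon (rs : List String) (k : Nat) (hk : k < pvMaxLen rs) (d0 : PySem.Dict String Int) :
    (pvCanon rs).getD (k : Int) d0 = PySem.Dict.counter (pvColumn rs k) := by
  refine PySem.Dict.getD_of_mem_items _ ?_ (pvNodupKeysCanon rs) d0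
  exact List.mem_map.mpr ⟨k, List.mem_range.mpr hk, rfl⟩

theorem pvGetAppendNe (t : List Char) (c : Char) (i : Nat) (h : i ≠ t.length) :
    (t ++ [c])[i]? = t[i]? := by
  rcases Nat.lt_or_ge i t.length with hlt | hge
  · rw [List.getElem?_append_left hlt]
  · have h1 : (t ++ [c]).length = t.length + 1 := by simp
    rw [List.getElem?_eq_none (by omega), List.getElem?_eq_none (by omega)]

theorem pvColNe (rs : List String) (t : List Char) (c : Char) (i : Nat) (h : i ≠ t.length) :
    pvColumn (rs ++ [String.ofList (t ++ [c])]) i = pvColumn (rs ++ [String.ofList t]) i := by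
  simp only [pvColumn_append, String.toList_ofList, pvGetAppendNe t c i h]

theorem pvColEqLast (rs : List String) (t : List Char) (c : Char) :
    pvColumn (rs ++ [String.ofList (t ++ [c])]) t.length
      = pvColumn rs t.length ++ [String.ofList [c]] := by
  rw [pvColumn_append]
  simp

theorem pvStepChar (rs : List String) (t : List Char) (c : Char) :
    (let d := pvCanon (rs ++ [String.ofList t])
     let i : Int := (t.length : Int)
     let d := if d.contains i then d else d.insert i PySem.Dict.empty
     let inner := d.getD i PySem.Dict.empty
     let inner := if inner.contains (String.ofList [c]) then inner
                  else inner.insert (String.ofList [c]) 0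
     d.insert i (inner.insert (String.ofList [c]) (inner.getD (String.ofList [c]) 0 + 1)))
    = pvCanon (rs ++ [String.ofList (t ++ [c])]) := by
  simp only []
  have hml : pvMaxLen (rs ++ [String.ofList t]) = max (pvMaxLen rs) t.length := by
    rw [pvMaxLen_append]; simp
  have hml' : pvMaxLen (rs ++ [String.ofList (t ++ [c])]) = max (pvMaxLen rs) (t.length + 1) := by
    rw [pvMaxLen_append]; simp
  have hcolt : pvColumn (rs ++ [String.ofList t]) t.length = pvColumn rs t.length := by
    rw [pvColumn_append]; simp
  by_cases hk : t.length < pvMaxLen rs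
  · -- position t.length already exists in the dict
    have hc : (pvCanon (rs ++ [String.ofList t])).contains ((t.length : Nat) : Int) = true := by
      rw [pvContainsCanon]; simp [hml]; omega
    rw [hc, if_pos rfl]
    rw [pvGetDCanon _ _ (by omega) _]
    rw [pvIncr', ← PySem.Dict.counter_append_singleton, hcolt]
    apply PySem.Dict.ext
    rw [PySem.Dict.items_insert_of_contains _ _ hc]
    simp only [pvCanon, hml, hml', Nat.max_eq_left (le_of_lt hk), Nat.max_eq_left hk, List.map_map]
    refine List.map_congr_left fun i hi => ?_
    by_cases hik : i = t.length
    · subst hik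
      simp only [Function.comp, beq_self_eq_true, if_true]
      rw [pvColEqLast]
    · have hbe : (((i:Nat) : Int) == ((t.length : Nat) : Int)) = false := by
        simp; omega
      simp only [Function.comp, hbe, Bool.false_eq_true, if_false]
      rw [pvColNe rs t c i hik]
  · -- position t.length is new: appended at the end
    have hc : (pvCanon (rs ++ [String.ofList t])).contains ((t.length : Nat) : Int) = false := by
      rw [pvContainsCanon]; simp [hml]; omega
    rw [hc]
    simp only [Bool.false_eq_true, if_false]
    rw [PySem.Dict.getD_insert_self]
    rw [pvIncr' PySem.Dict.empty (String.ofList [c])]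
    rw [PySem.Dict.insert_insert_self]
    have hcolk : pvColumn rs t.length = [] := pvColumn_nil_of_ge rs t.length (by omega)
    have hmod : (PySem.Dict.empty.modify (String.ofList [c]) 0 (· + 1) : PySem.Dict String Int)
        = PySem.Dict.counter (pvColumn (rs ++ [String.ofList (t ++ [c])]) t.length) := by
      rw [pvColEqLast, hcolk]
      rfl
    rw [hmod]
    apply PySem.Dict.ext
    rw [PySem.Dict.items_insert_of_not_contains _ _ hc]
    simp only [pvCanon, hml, hml', Nat.max_eq_right (by omega : pvMaxLen rs ≤ t.length),
      Nat.max_eq_right (by omega : pvMaxLen rs ≤ t.length + 1), List.range_succ, List.map_append,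
      List.map_cons, List.map_nil]
    congr 1
    refine List.map_congr_left fun i hi => ?_
    have hik : i ≠ t.length := by have := List.mem_range.mp hi; omega
    rw [pvColNe rs t c i hik]

theorem pvRow (rs : List String) (cs t : List Char) :
    (PySem.List.enumerate cs (t.length : Int)).foldl (fun d ic =>
        let d := if d.contains ic.1 then d else d.insert ic.1 PySem.Dict.empty
        let inner := d.getD ic.1 PySem.Dict.empty
        let inner := if inner.contains (String.ofList [ic.2]) then inner
                     else inner.insert (String.ofList [ic.2]) 0
        d.insert ic.1 (inner.insert (String.ofList [ic.2])
          (inner.getD (String.ofList [ic.2]) 0 + 1))) (pvCanon (rs ++ [String.ofList t]))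
    = pvCanon (rs ++ [String.ofList (t ++ cs)]) := by
  induction cs generalizing t with
  | nil => simp
  | cons c cs ih =>
    rw [PySem.List.enumerate_cons, List.foldl_cons]
    have hstep := pvStepChar rs t c
    simp only [] at hstep
    have harg : ((t.length : Int) + 1) = (((t ++ [c]).length : Nat) : Int) := by simp
    calc _ = (PySem.List.enumerate cs (((t ++ [c]).length : Nat) : Int)).foldl _
              (pvCanon (rs ++ [String.ofList (t ++ [c])])) := by rw [← harg, hstep]
      _ = pvCanon (rs ++ [String.ofList ((t ++ [c]) ++ cs)]) := ih (t ++ [c])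
      _ = pvCanon (rs ++ [String.ofList (t ++ c :: cs)]) := by rw [List.append_assoc]; rfl

theorem pvCanon_nil : pvCanon [] = PySem.Dict.empty := by
  rfl

theorem pvIntMax (rs : List String) (a : Nat) :
    rs.foldl (fun m num => if PySem.Str.len num > m then PySem.Str.len num else m) (a : Int)
      = ((rs.foldl (fun m s => max m s.toList.length) a : Nat) : Int) := by
  induction rs generalizing a with
  | nil => simp
  | cons x xs ih =>
    rw [List.foldl_cons, List.foldl_cons]
    have h1 : (if PySem.Str.len x > (a:Int) then PySem.Str.len x else (a:Int))
        = ((max a x.toList.length : Nat) : Int) := by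
      rw [PySem.Str.len_eq]
      split_ifs with h <;> omega
    rw [h1, ih]

theorem pvColCast (rs : List String) (j : Nat) :
    rs.filterMap (fun num => if ((j:Nat):Int) < PySem.Str.len num
        then (PySem.Str.pyGet? num ((j:Nat):Int)).map (fun c => String.ofList [c]) else none)
      = pvColumn rs j := by
  unfold pvColumn
  refine List.filterMap_congr fun num _ => ?_
  by_cases h : j < num.toList.length
  · simp [PySem.Str.pyGet?, PySem.Chars.pyGet?, PySem.List.pyGet?_natCast, PySem.Str.len_eq]
  · simp [PySem.Str.len_eq, List.getElem?_eq_none (by omega : num.toList.length ≤ j)]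

theorem pvB_eq_canon (rs : List String) :
    count_bits_per_pos_alt rs = (pvCanon rs).items.map (fun p => (p.1, p.2.items)) := by
  rw [count_bits_per_pos_alt]
  simp only []
  have hmax : rs.foldl (fun m num => if PySem.Str.len num > m then PySem.Str.len num else m) 0
      = ((pvMaxLen rs : Nat) : Int) := by
    have := pvIntMax rs 0
    simpa [pvMaxLen] using this
  rw [hmax]
  rw [PySem.List.pyRange_one]
  simp only [sub_zero, Int.toNat_natCast, zero_add]
  have hfold : ∀ (js : List Nat) (d : PySem.Dict Int (PySem.Dict String Int)),
      (js.map (fun k : Nat => (k : Int))).foldl (fun r i =>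
        r.insert i ((rs.filterMap (fun num => if i < PySem.Str.len num
            then (PySem.Str.pyGet? num i).map (fun c => String.ofList [c]) else none)).foldl
          (fun cd c => cd.insert c (cd.getD c 0 + 1)) PySem.Dict.empty)) d
      = js.foldl (fun r j => r.insert ((j:Nat):Int) (PySem.Dict.counter (pvColumn rs j))) d := by
    intro js
    induction js with
    | nil => intro d; rfl
    | cons j js ih =>
      intro d
      rw [List.map_cons, List.foldl_cons, List.foldl_cons]
      rw [pvColCast rs j, PySem.Dict.foldl_insert_getD_add_one_eq_counter]
      exact ih _
  rw [show (List.range (pvMaxLen rs)).map (fun k : Nat => (k : Int))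
        = (List.range (pvMaxLen rs)).map (fun k : Nat => (k : Int)) from rfl]
  rw [hfold (List.range (pvMaxLen rs)) PySem.Dict.empty]
  have hitems := PySem.Dict.items_foldl_insert_fresh (List.range (pvMaxLen rs))
      (fun j : Nat => (j : Int)) (fun j => PySem.Dict.counter (pvColumn rs j)) PySem.Dict.empty
      (fun a _ => PySem.Dict.contains_empty _) ((List.nodup_range).map (fun a b h => by omega))
  rw [hitems]
  simp [pvCanon, PySem.Dict.empty]

theorem pvA_eq_canon (rs : List String) :
    (rs.foldl (fun d num =>
      (PySem.List.enumerate num.toList).foldl (fun d ic =>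
        let d := if d.contains ic.1 then d else d.insert ic.1 PySem.Dict.empty
        let inner := d.getD ic.1 PySem.Dict.empty
        let inner := if inner.contains (String.ofList [ic.2]) then inner
                     else inner.insert (String.ofList [ic.2]) 0
        d.insert ic.1 (inner.insert (String.ofList [ic.2])
          (inner.getD (String.ofList [ic.2]) 0 + 1))) d)
      PySem.Dict.empty)
    = pvCanon rs := by
  induction rs using List.reverseRecOn with
  | nil => rw [pvCanon_nil]; rfl
  | append_singleton rs s ih =>
    rw [List.foldl_append, List.foldl_cons, List.foldl_nil, ih]
    have h := pvRow rs s.toList []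
    rw [pvCanon_append_nil, List.nil_append, String.ofList_toList] at h
    exact h

-- ===== VERDICT (by name: the statement is the Claim_ definition above) =====
theorem count_bits_per_pos_spec : Claim_equal_count_bits_per_pos := by
  intro report _
  show count_bits_per_pos report = count_bits_per_pos_alt report
  rw [count_bits_per_pos, pvA_eq_canon, pvB_eq_canon]
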